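-- pv_equiv track=rewrite | github.com/DAMIANSEGUIN/what-is-my-delta-site | upload-package/api/core/opportunity_bridge.py | calculate_role_fit
-- ===== SOURCE A (Python) =====
-- from typing import Dict, List, Optional, Any
--
-- def calculate_role_fit(job_title: str, validated_roles: List[str]) -> int:
--     """Calculate role fit based on WIMD validated roles"""
--     if not validated_roles:
--         return 70
--
--     job_title_lower = job_title.lower()
--
--     for validated_role in validated_roles:
--         if validated_role.lower() in job_title_lower or job_title_lower in validated_role.lower():
--             return 95  # Strong match
--
--     # Partial matches
--     job_words = set(job_title_lower.split())
--     for validated_role in validated_roles: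
--         validated_words = set(validated_role.lower().split())
--         if job_words & validated_words:  # Any word overlap
--             return 75
--
--     return 60  # No clear match
-- ===== SOURCE B (Python) =====
-- def calculate_role_fit(job_title, validated_roles):
--     if not validated_roles:
--         return 70
--     job_title_lower = job_title.lower()
--     job_words = set(job_title_lower.split())
--     partial = False
--     for validated_role in validated_roles:
--         role_lower = validated_role.lower()
--         if role_lower in job_title_lower or job_title_lower in role_lower:
--             return 95
--         if job_words & set(role_lower.split()):
--             partial = True
--     return 75 if partial else 60
-- ===== Notes on version B (the rewrite author's own statement) =====
-- stated objective: simpler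
-- what changed: A's two separate scans over validated_roles are fused into one loop that returns 95 immediately on a substring match and otherwise accumulates a word-overlap flag, resolved to 75/60 after the loop.
import Mathlib
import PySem

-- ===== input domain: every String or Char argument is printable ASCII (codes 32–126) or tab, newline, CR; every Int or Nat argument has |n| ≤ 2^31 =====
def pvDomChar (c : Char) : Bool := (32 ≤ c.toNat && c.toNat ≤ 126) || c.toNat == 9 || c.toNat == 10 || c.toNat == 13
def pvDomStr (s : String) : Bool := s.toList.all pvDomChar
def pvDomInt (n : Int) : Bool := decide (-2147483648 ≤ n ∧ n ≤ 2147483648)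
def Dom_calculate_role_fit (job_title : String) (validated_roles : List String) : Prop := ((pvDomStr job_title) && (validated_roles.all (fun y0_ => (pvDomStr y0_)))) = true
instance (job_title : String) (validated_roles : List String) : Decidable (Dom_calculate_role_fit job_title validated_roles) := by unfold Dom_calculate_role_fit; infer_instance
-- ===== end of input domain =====

-- B fuses A's two scans into one loop with a word-overlap flag; simpler, same behaviour.

-- ===== PORT A =====
-- first loop of A: any substring match either way
def pvA_strong (jtl : String) : List String → Bool
  | [] => false
  | r :: rs =>
    if PySem.Str.isIn (PySem.Str.lower r) jtl || PySem.Str.isIn jtl (PySem.Str.lower r) then true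
    else pvA_strong jtl rs

-- second loop of A: any word overlap with job_words
def pvA_partial (jw : PySem.Set String) : List String → Bool
  | [] => false
  | r :: rs =>
    if !(PySem.Set.inter jw (PySem.Set.ofList (PySem.Str.split₀ (PySem.Str.lower r)))).isEmpty then true
    else pvA_partial jw rs

def calculate_role_fit (job_title : String) (validated_roles : List String) : Int :=
  if validated_roles = [] then 70
  else
    let job_title_lower := PySem.Str.lower job_title
    if pvA_strong job_title_lower validated_roles then 95
    else
      let job_words : PySem.Set String := PySem.Set.ofList (PySem.Str.split₀ job_title_lower)
      if pvA_partial job_words validated_roles then 75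
      else 60

-- ===== PORT B =====
-- B's single loop: return 95 on substring match, else accumulate the overlap flag
def pvB_loop (jtl : String) (jw : PySem.Set String) (partial_ : Bool) : List String → Int
  | [] => if partial_ then 75 else 60
  | r :: rs =>
    let rl := PySem.Str.lower r
    if PySem.Str.isIn rl jtl || PySem.Str.isIn jtl rl then 95
    else pvB_loop jtl jw (partial_ || !(PySem.Set.inter jw (PySem.Set.ofList (PySem.Str.split₀ rl))).isEmpty) rs

def calculate_role_fit_alt (job_title : String) (validated_roles : List String) : Int :=
  if validated_roles = [] then 70
  else
    let job_title_lower := PySem.Str.lower job_title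
    let job_words : PySem.Set String := PySem.Set.ofList (PySem.Str.split₀ job_title_lower)
    pvB_loop job_title_lower job_words false validated_roles

-- ===== PRECONDITION & SPEC =====
def Spec_calculate_role_fit (job_title : String) (validated_roles : List String) (out : Int) : Prop := out = calculate_role_fit_alt job_title validated_roles
instance (job_title : String) (validated_roles : List String) (out : Int) : Decidable (Spec_calculate_role_fit job_title validated_roles out) := by unfold Spec_calculate_role_fit; infer_instance

-- ===== CLAIM (what is proved, stated in full; the proofs are below) =====
def Claim_equal_calculate_role_fit : Prop := ∀ (job_title : String) (validated_roles : List String), Dom_calculate_role_fit job_title validated_roles → Spec_calculate_role_fit job_title validated_roles (calculate_role_fit job_title validated_roles)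

-- ===== LEMMAS AND PROOFS =====
theorem pvB_loop_eq (jtl : String) (jw : PySem.Set String) (flag : Bool) (roles : List String) :
    pvB_loop jtl jw flag roles =
      if pvA_strong jtl roles then 95
      else if flag || pvA_partial jw roles then 75 else 60 := by
  induction roles generalizing flag with
  | nil => simp [pvB_loop, pvA_strong, pvA_partial]
  | cons r rs ih =>
    by_cases h : PySem.Chars.isIn (PySem.Chars.lower r.toList) jtl.toList = true ∨ PySem.Chars.isIn jtl.toList (PySem.Chars.lower r.toList) = true
    · simp [pvB_loop, pvA_strong, h]
    · by_cases ho : (PySem.Set.inter jw (PySem.Set.ofList (PySem.Str.split₀ (PySem.Str.lower r)))).isEmpty = true <;>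
        by_cases hs : pvA_strong jtl rs = true <;>
          simp [pvB_loop, pvA_strong, pvA_partial, ih, h, hs, ho]

-- ===== VERDICT (by name: the statement is the Claim_ definition above) =====
theorem calculate_role_fit_spec : Claim_equal_calculate_role_fit := by
  intro job_title validated_roles _
  unfold Spec_calculate_role_fit calculate_role_fit calculate_role_fit_alt
  by_cases h : validated_roles = []
  · simp [h]
  · simp only [h, if_false, pvB_loop_eq, Bool.false_or]
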